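-- pv_equiv track=rewrite | github.com/graysky-ai/Lexibrary | src/lexibrary/services/lookup.py | truncate_lookup_sections
-- ===== SOURCE A (Python) =====
-- def estimate_tokens(text: str) -> int:
--     """Estimate token count using a character-based heuristic.
--
--     Approximates ~4 characters per token, avoiding the overhead of
--     importing a tokenizer for CLI output.
--     """
--     if not text:
--         return 0
--     return max(1, len(text) // 4)
--
-- def truncate_lookup_sections(
--     sections: list[tuple[str, str, int]],
--     total_budget: int,
-- ) -> list[tuple[str, str]]:
--     """Truncate lookup sections to fit within a token budget.
--
--     Sections are provided as ``(name, content, priority)`` tuples where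
--     lower priority values mean higher importance.  Sections are included
--     in priority order until the budget is exhausted.
--
--     Priority order: design (0) > conventions (1) > issues (2) > IWH (3) > links (4)
--
--     Returns a list of ``(name, content)`` tuples for sections that fit.
--     """
--     # Sort by priority (lower = more important)
--     sorted_sections = sorted(sections, key=lambda s: s[2])
--
--     result: list[tuple[str, str]] = []
--     used_tokens = 0
--
--     for name, content, _priority in sorted_sections:
--         if not content:
--             continue
--         section_tokens = estimate_tokens(content)
--         if used_tokens + section_tokens <= total_budget:
--             result.append((name, content))
--             used_tokens += section_tokens
--         else:
--             # Try to include a truncated version if there's budget left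
--             remaining = total_budget - used_tokens
--             if remaining > 50:
--                 max_chars = remaining * 4
--                 truncated = content[:max_chars] + "\n... truncated due to token budget\n"
--                 result.append((name, truncated))
--                 used_tokens = total_budget
--             break
--
--     return result
-- ===== SOURCE B (Python) =====
-- def truncate_lookup_sections(
--     sections: list[tuple[str, str, int]],
--     total_budget: int,
-- ) -> list[tuple[str, str]]:
--     # Table-driven rewrite: filter the sorted sections to non-empty ones,
--     # build a prefix-sum table of token estimates, cut at the first overflow
--     # index, then handle the single boundary section.
--     ne = [(n, c) for n, c, _ in sorted(sections, key=lambda s: s[2]) if c]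
--     toks = [max(1, len(c) // 4) for _, c in ne]
--     pref = []
--     running = 0
--     for t in toks:
--         running += t
--         pref.append(running)
--     # prefix sums are strictly increasing, so the first overflow index is
--     # simply the number of prefix sums within budget
--     k = sum(1 for p in pref if p <= total_budget)
--     out = ne[:k]
--     if k < len(ne):
--         rem = total_budget - sum(toks[:k])
--         if rem > 50:
--             n, c = ne[k]
--             out.append((n, c[:rem * 4] + "\n... truncated due to token budget\n"))
--     return out
-- ===== Notes on version B (the rewrite author's own statement) =====
-- stated objective: alternative
-- what changed: Replaced the interleaved accumulate-and-test loop with early break by a table pass: filter non-empty sections after the stable sort, build a prefix-sum table of token estimates, count the prefix sums within budget to get the cutoff index, slice the list there, and handle the single boundary section separately.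
import Mathlib
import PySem

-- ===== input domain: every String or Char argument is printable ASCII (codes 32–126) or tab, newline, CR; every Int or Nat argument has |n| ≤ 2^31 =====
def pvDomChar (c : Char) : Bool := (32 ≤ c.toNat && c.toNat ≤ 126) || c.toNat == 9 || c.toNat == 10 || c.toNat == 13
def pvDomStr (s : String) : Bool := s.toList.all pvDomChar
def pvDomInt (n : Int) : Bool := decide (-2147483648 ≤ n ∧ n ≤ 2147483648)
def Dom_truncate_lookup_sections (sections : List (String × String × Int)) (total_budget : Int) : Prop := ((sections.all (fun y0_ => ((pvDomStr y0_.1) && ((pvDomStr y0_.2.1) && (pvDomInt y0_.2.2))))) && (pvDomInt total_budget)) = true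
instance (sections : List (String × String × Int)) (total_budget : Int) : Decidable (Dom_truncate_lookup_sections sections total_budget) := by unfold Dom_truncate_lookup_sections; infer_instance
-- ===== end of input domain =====

-- B replaces A's interleaved accumulate-and-test loop (with break) by a table pass:
-- filter non-empty sections after the stable sort, build a prefix-sum table of token
-- estimates, count the sums within budget to get the cutoff index, slice there, and
-- handle the single boundary section separately (objective: alternative decomposition).

-- ===== PORT A =====
def pyEstimateTokens (text : String) : Int :=
  if text = "" then 0 else max 1 (PySem.Int.floordiv (PySem.Str.len text) 4)

def truncA_loop (total_budget : Int) :
    List (String × String × Int) → Int → List (String × String) → List (String × String)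
  | [], _, result => result
  | (name, content, _p) :: rest, used, result =>
    if content = "" then truncA_loop total_budget rest used result
    else
      let section_tokens := pyEstimateTokens content
      if used + section_tokens ≤ total_budget then
        truncA_loop total_budget rest (used + section_tokens) (result ++ [(name, content)])
      else
        let remaining := total_budget - used
        if remaining > 50 then
          result ++ [(name, PySem.Str.slice content none (some (remaining * 4)) ++ "\n... truncated due to token budget\n")]
        else
          result

def truncate_lookup_sections (sections : List (String × String × Int)) (total_budget : Int) : List (String × String) :=
  truncA_loop total_budget (PySem.List.sorted sections (fun s => s.2.2)) 0 []

-- ===== PORT B =====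
def truncate_lookup_sections_alt (sections : List (String × String × Int)) (total_budget : Int) : List (String × String) :=
  let ne := ((PySem.List.sorted sections (fun s => s.2.2)).filter (fun t => !(t.2.1 == ""))).map (fun t => (t.1, t.2.1))
  let toks := ne.map (fun t => max 1 (PySem.Int.floordiv (PySem.Str.len t.2) 4))
  let pref := (toks.foldl (fun st t => (st.1 + t, st.2 ++ [st.1 + t])) ((0 : Int), ([] : List Int))).2
  let k := pref.countP (fun p => decide (p ≤ total_budget))
  let out := ne.take k
  match ne[k]? with
  | none => out
  | some nc =>
    let rem := total_budget - (toks.take k).sum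
    if rem > 50 then
      out ++ [(nc.1, PySem.Str.slice nc.2 none (some (rem * 4)) ++ "\n... truncated due to token budget\n")]
    else
      out

-- ===== PRECONDITION & SPEC =====
def Spec_truncate_lookup_sections (sections : List (String × String × Int)) (total_budget : Int) (out : List (String × String)) : Prop := out = truncate_lookup_sections_alt sections total_budget
instance (sections : List (String × String × Int)) (total_budget : Int) (out : List (String × String)) : Decidable (Spec_truncate_lookup_sections sections total_budget out) := by unfold Spec_truncate_lookup_sections; infer_instance

-- ===== CLAIM (what is proved, stated in full; the proofs are below) =====
def Claim_equal_truncate_lookup_sections : Prop := ∀ (sections : List (String × String × Int)) (total_budget : Int), Dom_truncate_lookup_sections sections total_budget → Spec_truncate_lookup_sections sections total_budget (truncate_lookup_sections sections total_budget)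

-- ===== LEMMAS AND PROOFS =====

-- the list of prefix sums of ts (no leading zero)
def pvSums : List Int → List Int
  | [] => []
  | t :: ts => t :: (pvSums ts).map (t + ·)

-- the non-empty sections of l, as (name, content) pairs
def pvNe (l : List (String × String × Int)) : List (String × String) :=
  (l.filter (fun t => !(t.2.1 == ""))).map (fun t => (t.1, t.2.1))

-- B's computation, abstracted over the filtered list and the budget
def pvTable (m : List (String × String)) (budget : Int) : List (String × String) :=
  let toks := m.map (fun t => max 1 (PySem.Int.floordiv (PySem.Str.len t.2) 4))
  let k := (pvSums toks).countP (fun p => decide (p ≤ budget))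
  let out := m.take k
  match m[k]? with
  | none => out
  | some nc =>
    let rem := budget - (toks.take k).sum
    if rem > 50 then
      out ++ [(nc.1, PySem.Str.slice nc.2 none (some (rem * 4)) ++ "\n... truncated due to token budget\n")]
    else
      out

lemma pv_foldl_pref (ts : List Int) (a : Int) (acc : List Int) :
    (ts.foldl (fun st t => (st.1 + t, st.2 ++ [st.1 + t])) (a, acc)).2
      = acc ++ (pvSums ts).map (a + ·) := by
  induction ts generalizing a acc with
  | nil => simp [pvSums]
  | cons t ts ih =>
      simp only [List.foldl_cons, pvSums, List.map_cons, List.map_map]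
      rw [ih]
      simp [add_assoc]

lemma pv_sums_pos (ts : List Int) (h : ∀ t ∈ ts, 1 ≤ t) : ∀ p ∈ pvSums ts, 1 ≤ p := by
  induction ts with
  | nil => simp [pvSums]
  | cons t ts ih =>
      intro x hx
      simp only [pvSums, List.mem_cons, List.mem_map] at hx
      rcases hx with rfl | ⟨q, hq, rfl⟩
      · exact h _ (by simp)
      · have h1 : 1 ≤ t := h t (by simp)
        have h2 : 1 ≤ q := ih (fun y hy => h y (by simp [hy])) q hq
        omega

lemma pv_alt_eq_table (sections : List (String × String × Int)) (total_budget : Int) :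
    truncate_lookup_sections_alt sections total_budget
      = pvTable (pvNe (PySem.List.sorted sections (fun s => s.2.2))) total_budget := by
  unfold truncate_lookup_sections_alt pvTable pvNe
  simp only [pv_foldl_pref, List.nil_append]
  simp

lemma pv_loop_eq (l : List (String × String × Int)) (budget : Int) :
    ∀ (used : Int) (res : List (String × String)),
      truncA_loop budget l used res = res ++ pvTable (pvNe l) (budget - used) := by
  induction l with
  | nil => intro used res; simp [truncA_loop, pvNe, pvTable, pvSums]
  | cons hd rest ih =>
      obtain ⟨n, c, p⟩ := hd
      intro used res
      by_cases hc : c = ""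
      · subst hc
        simp only [truncA_loop]
        rw [ih]
        have hpe : pvNe ((n, "", p) :: rest) = pvNe rest := by simp [pvNe]
        rw [hpe]
        simp
      · have hne : pvNe ((n, c, p) :: rest) = (n, c) :: pvNe rest := by
          simp [pvNe, hc]
        have htok : pyEstimateTokens c = max 1 (PySem.Int.floordiv (PySem.Str.len c) 4) := by
          simp [pyEstimateTokens, hc]
        set tok := max 1 (PySem.Int.floordiv (PySem.Str.len c) 4) with htokdef
        by_cases h2 : used + tok ≤ budget
        · -- section fits wholesale
          have : truncA_loop budget ((n, c, p) :: rest) used res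
              = truncA_loop budget rest (used + tok) (res ++ [(n, c)]) := by
            simp [truncA_loop, hc, htok, h2]
          rw [this, ih]
          rw [hne]
          -- unfold pvTable on the cons and shift by tok
          unfold pvTable
          simp only [List.map_cons, pvSums, List.countP_cons, List.countP_map]
          have hd1 : decide (tok ≤ budget - used) = true := by simp; omega
          have hcong : ∀ S : List Int,
              S.countP ((fun p => decide (p ≤ budget - used)) ∘ (fun x => tok + x))
                = S.countP (fun p => decide (p ≤ budget - (used + tok))) := by
            intro S
            apply List.countP_congr
            intro a _
            simp only [Function.comp]
            by_cases hle : tok + a ≤ budget - used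
            · simp [hle]; omega
            · simp at hle ⊢; constructor <;> intro h <;> omega
          rw [hcong, hd1]
          simp only [if_true]
          set k := (pvSums ((pvNe rest).map (fun t => max 1 (PySem.Int.floordiv (PySem.Str.len t.2) 4)))).countP
              (fun p => decide (p ≤ budget - (used + tok))) with hk
          try simp only [List.take_succ_cons, List.getElem?_cons_succ, List.sum_cons]
          have harith : budget - used - (tok + ((((pvNe rest).map (fun t => max 1 (PySem.Int.floordiv (PySem.Str.len t.2) 4))).take k).sum))
              = budget - (used + tok) - (((pvNe rest).map (fun t => max 1 (PySem.Int.floordiv (PySem.Str.len t.2) 4))).take k).sum := by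
            ring
          rw [harith]
          cases hget : (pvNe rest)[k]? with
          | none => simp
          | some nc => split_ifs <;> try simp
        · -- overflow at this section
          have hstep : truncA_loop budget ((n, c, p) :: rest) used res
              = if budget - used > 50 then
                  res ++ [(n, PySem.Str.slice c none (some ((budget - used) * 4)) ++ "\n... truncated due to token budget\n")]
                else res := by
            simp [truncA_loop, hc, htok, h2]
          rw [hstep, hne]
          unfold pvTable
          simp only [List.map_cons, pvSums, List.countP_cons, List.countP_map]
          have hd1 : decide (tok ≤ budget - used) = false := by simp; omega
          have hzero : ((pvSums ((pvNe rest).map (fun t => max 1 (PySem.Int.floordiv (PySem.Str.len t.2) 4)))).countP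
              ((fun p => decide (p ≤ budget - used)) ∘ (fun x => tok + x))) = 0 := by
            rw [List.countP_eq_zero]
            intro a ha
            have h1 : 1 ≤ a := by
              refine pv_sums_pos _ ?_ a ha
              intro t ht
              simp only [List.mem_map] at ht
              obtain ⟨x, _, rfl⟩ := ht
              exact le_max_left _ _
            simp only [Function.comp, decide_eq_true_eq]
            omega
          rw [hzero, hd1]
          try simp only [List.take_zero, List.getElem?_cons_zero, List.sum_nil, sub_zero, List.nil_append]
          split_ifs <;> (try simp) <;> (try simp_all) <;> omega

-- ===== VERDICT (by name: the statement is the Claim_ definition above) =====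
theorem truncate_lookup_sections_spec : Claim_equal_truncate_lookup_sections := by
  intro sections total_budget _dom
  unfold Spec_truncate_lookup_sections
  rw [pv_alt_eq_table]
  unfold truncate_lookup_sections
  rw [pv_loop_eq]
  simp
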